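-- pv_equiv track=rewrite | github.com/soonyz06/ETF-Arb | test_critical.py | _add_neighbours
-- ===== SOURCE A (Python) =====
-- def _add_neighbours(point): #3^n Ints
--     n = len(point)
--     offsets = [-1, 0, 1]
--     result = []
--     def recurse(i, current):
--         if i == n:
--             result.append(tuple(current))
--             return
--         for d in offsets:
--             recurse(i + 1, current + [point[i] + d])
--     recurse(0, [])
--     return result
-- ===== SOURCE B (Python) =====
-- from itertools import product
--
-- def _add_neighbours(point):
--     n = len(point)
--     result = []
--     for combo in product([-1, 0, 1], repeat=n):
--         result.append(tuple(point[i] + d for i, d in enumerate(combo)))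
--     return result
-- ===== Notes on version B (the rewrite author's own statement) =====
-- stated objective: idiomatic
-- what changed: Replaced the hand-written recursive enumeration with a single flat loop over itertools.product([-1,0,1], repeat=n), summing each delta tuple into the point.
import Mathlib
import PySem

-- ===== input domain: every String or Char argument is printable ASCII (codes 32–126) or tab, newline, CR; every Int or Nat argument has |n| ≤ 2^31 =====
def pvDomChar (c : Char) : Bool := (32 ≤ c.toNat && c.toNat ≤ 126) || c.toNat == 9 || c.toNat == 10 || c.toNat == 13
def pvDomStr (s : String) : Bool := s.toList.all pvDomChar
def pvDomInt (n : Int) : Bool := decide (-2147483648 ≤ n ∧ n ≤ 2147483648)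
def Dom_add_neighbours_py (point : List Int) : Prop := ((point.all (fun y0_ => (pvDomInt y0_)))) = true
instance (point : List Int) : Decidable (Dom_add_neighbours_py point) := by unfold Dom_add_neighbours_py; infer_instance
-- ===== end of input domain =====

-- B replaces A's recursive enumeration by a flat loop over the Cartesian product of offsets (idiomatic; same cost).
-- ===== PORT A =====
-- recurse(i, current): ported as structural recursion on the suffix of `point` (suffix = point[i:]);
-- the appends into `result` become foldl-concatenation over the offsets, in the same order.
def pvRecA (offsets : List Int) : List Int → List Int → List (List Int)
  | [], current => [current]
  | p :: rest, current =>
      offsets.foldl (fun acc d => acc ++ pvRecA offsets rest (current ++ [p + d])) []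

def add_neighbours_py (point : List Int) : List (List Int) :=
  pvRecA [-1, 0, 1] point []

-- ===== PORT B =====
-- itertools.product(offsets, repeat=n), in product's order (leftmost position varies slowest)
def pvProd (offsets : List Int) : Nat → List (List Int)
  | 0 => [[]]
  | n + 1 => offsets.flatMap (fun d => (pvProd offsets n).map (fun t => d :: t))

def add_neighbours_py_alt (point : List Int) : List (List Int) :=
  (pvProd [-1, 0, 1] point.length).map (fun combo => List.zipWith (· + ·) point combo)

-- ===== PRECONDITION & SPEC =====
def Spec_add_neighbours_py (point : List Int) (out : List (List Int)) : Prop := out = add_neighbours_py_alt point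
instance (point : List Int) (out : List (List Int)) : Decidable (Spec_add_neighbours_py point out) := by unfold Spec_add_neighbours_py; infer_instance

-- ===== CLAIM (what is proved, stated in full; the proofs are below) =====
def Claim_equal_add_neighbours_py : Prop := ∀ (point : List Int), Dom_add_neighbours_py point → Spec_add_neighbours_py point (add_neighbours_py point)

-- ===== LEMMAS AND PROOFS =====



theorem pvRecA_eq (offsets rest : List Int) (current : List Int) :
    pvRecA offsets rest current
      = (pvProd offsets rest.length).map (fun c => current ++ List.zipWith (· + ·) rest c) := by
  induction rest generalizing current with
  | nil => simp [pvRecA, pvProd]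
  | cons p tl ih =>
      show offsets.foldl (fun acc d => acc ++ pvRecA offsets tl (current ++ [p + d])) [] = _
      rw [PySem.List.foldl_append_eq_flatMap]
      simp only [pvProd, List.length_cons, List.map_flatMap, List.map_map, List.nil_append]
      refine List.flatMap_congr ?_
      intro d _
      rw [ih]
      simp [Function.comp_def, List.append_assoc]

-- ===== VERDICT =====
theorem add_neighbours_py_spec : Claim_equal_add_neighbours_py := by
  intro point _
  unfold Spec_add_neighbours_py add_neighbours_py add_neighbours_py_alt
  rw [pvRecA_eq]
  simp
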